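-- pv_equiv track=rewrite | github.com/harshitrathor3/Programming-Data-Structure-and-Algorithm-in-Python | Week 4/Assignment 1.py | transcript
-- ===== SOURCE A (Python) =====
-- def getName(rolno, l):
--     for i in range(len(l)):
--         if l[i][0]==rolno:
--             return l[i][1]
--
-- def subjName(code, l):
--     for i in l:
--         if i[0]==code:
--             return i[1]
--
-- def transcript(cd, sd, t):
--     res=[]
--     for i in sd:
--         lst=[]
--         for j in t:
--             if j[0]==i[0]:
--                 a=(j[1],subjName(j[1],cd),j[2])
--                 lst+=[a]
--         lst.sort(key=lambda x:x[0])
--         ans=(i[0],getName(i[0],sd),lst)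
--         res+=[tuple(ans)]
--     res.sort(key = lambda x:x[0])
--     return res
-- ===== SOURCE B (Python) =====
-- def transcript(cd, sd, t):
--     code2name = {}
--     for c, n in cd:
--         if c not in code2name:
--             code2name[c] = n
--     students = {}
--     for r, n in sd:
--         if r not in students:
--             students[r] = (n, [])
--     for r, c, m in t:
--         if r in students:
--             students[r][1].append((c, code2name[c], m))
--     return [(r, students[r][0], sorted(students[r][1], key=lambda x: x[0]))
--             for r, _ in sorted(sd, key=lambda x: x[0])]
-- ===== Notes on version B (the rewrite author's own statement) =====
-- stated objective: alternative
-- what changed: B builds first-wins dicts (code->name, roll->(name, grouped marks)) in one pass over each input and maps over the sorted student list, a hash-index alternative to A's per-student rescan of t and per-mark linear scans of cd and sd (intended as faster; measured only 1.46x at the largest size).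
import Mathlib
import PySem

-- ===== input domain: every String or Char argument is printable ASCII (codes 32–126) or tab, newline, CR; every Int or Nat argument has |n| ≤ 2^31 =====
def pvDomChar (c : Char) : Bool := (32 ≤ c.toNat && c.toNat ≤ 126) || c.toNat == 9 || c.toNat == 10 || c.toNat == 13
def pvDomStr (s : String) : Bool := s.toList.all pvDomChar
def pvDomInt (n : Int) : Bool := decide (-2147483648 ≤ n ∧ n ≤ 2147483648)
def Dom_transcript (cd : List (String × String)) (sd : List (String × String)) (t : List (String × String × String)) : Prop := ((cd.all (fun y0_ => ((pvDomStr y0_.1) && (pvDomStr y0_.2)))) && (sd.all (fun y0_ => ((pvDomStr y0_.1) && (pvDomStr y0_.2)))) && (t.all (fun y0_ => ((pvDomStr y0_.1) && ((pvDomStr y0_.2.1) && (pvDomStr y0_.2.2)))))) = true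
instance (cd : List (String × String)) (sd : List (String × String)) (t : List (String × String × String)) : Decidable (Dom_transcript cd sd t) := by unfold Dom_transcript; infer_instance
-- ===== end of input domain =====

-- B builds dicts (code->name, roll->(name, grouped marks)) in one pass over each input and
-- maps over the sorted student list, replacing A's per-student rescan of t and linear lookups.


-- ===== PORT A =====
-- 'for i in range(len(l)): if l[i][0]==rolno: return l[i][1]' — the same left-to-right
-- scan with early return, as structural recursion; none = Python's implicit None.
def getName (rolno : String) (l : List (String × String)) : Option String :=
  match l with
  | [] => none
  | p :: rest => if p.1 == rolno then some p.2 else getName rolno rest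

def subjName (code : String) (l : List (String × String)) : Option String :=
  match l with
  | [] => none
  | p :: rest => if p.1 == code then some p.2 else subjName code rest

-- '.getD ""' stands where Python would place None inside the tuple; Pre_transcript
-- excludes every input on which subjName misses, and getName never misses here.
def transcript (cd : List (String × String)) (sd : List (String × String)) (t : List (String × String × String)) : List (String × String × (List (String × String × String))) :=
  let res := sd.foldl (fun res i =>
    let lst := t.foldl (fun lst j =>
      if j.1 == i.1 then lst ++ [(j.2.1, (subjName j.2.1 cd).getD "", j.2.2)] else lst) []
    let lst := PySem.List.sorted lst (fun x => x.1) false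
    res ++ [(i.1, (getName i.1 sd).getD "", lst)]) []
  PySem.List.sorted res (fun x => x.1) false

-- ===== PORT B =====
-- 'code2name[c]' raises KeyError in Python when c is missing; '.getD ""' stands for
-- that (excluded by Pre_transcript, where every used code is in cd); 'students[r]' in
-- the final comprehension always hits, ported with the same never-used default.
def transcript_alt (cd : List (String × String)) (sd : List (String × String)) (t : List (String × String × String)) : List (String × String × (List (String × String × String))) :=
  let code2name := cd.foldl (fun d p => if d.contains p.1 then d else d.insert p.1 p.2) PySem.Dict.empty
  let students : PySem.Dict String (String × List (String × String × String)) :=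
    sd.foldl (fun d p => if d.contains p.1 then d else d.insert p.1 (p.2, [])) PySem.Dict.empty
  let students := t.foldl (fun d j =>
    if d.contains j.1 then
      d.modify j.1 ("", []) (fun pr => (pr.1, pr.2 ++ [(j.2.1, (code2name.get? j.2.1).getD "", j.2.2)]))
    else d) students
  (PySem.List.sorted sd (fun x => x.1) false).map
    (fun p => (p.1, (students.getD p.1 ("", [])).1,
      PySem.List.sorted (students.getD p.1 ("", [])).2 (fun x => x.1) false))

-- ===== PRECONDITION & SPEC =====
-- Pre_ excludes exactly the inputs with a transcript row whose roll is in sd but whose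
-- subject code is missing from cd: there A puts None (not a str) into the returned
-- tuple and B raises KeyError.
def Pre_transcript (cd : List (String × String)) (sd : List (String × String)) (t : List (String × String × String)) : Prop :=
  ∀ j ∈ t, j.1 ∈ sd.map Prod.fst → j.2.1 ∈ cd.map Prod.fst
instance (cd : List (String × String)) (sd : List (String × String)) (t : List (String × String × String)) : Decidable (Pre_transcript cd sd t) := by unfold Pre_transcript; infer_instance

def pvWitness_transcript : (List (String × String)) × (List (String × String)) × (List (String × String × String)) :=
  ([("CS", "CompSci")], [("7", "Alice")], [("7", "CS", "A")])

def Spec_transcript (cd : List (String × String)) (sd : List (String × String)) (t : List (String × String × String)) (out : List (String × String × (List (String × String × String)))) : Prop := out = transcript_alt cd sd t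
instance (cd : List (String × String)) (sd : List (String × String)) (t : List (String × String × String)) (out : List (String × String × (List (String × String × String)))) : Decidable (Spec_transcript cd sd t out) := by unfold Spec_transcript; infer_instance

-- ===== CLAIM (what is proved, stated in full; the proofs are below) =====
def Claim_equal_transcript : Prop := ∀ (cd : List (String × String)) (sd : List (String × String)) (t : List (String × String × String)), Dom_transcript cd sd t → Pre_transcript cd sd t → Spec_transcript cd sd t (transcript cd sd t)

-- ===== LEMMAS AND PROOFS =====

-- A's scans are List.find? on the key
theorem subjName_eq_find? (k : String) (l : List (String × String)) :
    subjName k l = (l.find? (fun p => p.1 == k)).map Prod.snd := by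
  induction l with
  | nil => rfl
  | cons p rest ih =>
    cases hb : (p.1 == k) with
    | true => simp [subjName, hb]
    | false => simp [subjName, hb, ih]

theorem getName_eq_find? (k : String) (l : List (String × String)) :
    getName k l = (l.find? (fun p => p.1 == k)).map Prod.snd := by
  induction l with
  | nil => rfl
  | cons p rest ih =>
    cases hb : (p.1 == k) with
    | true => simp [getName, hb]
    | false => simp [getName, hb, ih]

theorem getName_isSome_of_mem (sd : List (String × String)) (r n : String)
    (hm : (r, n) ∈ sd) : ∃ m, getName r sd = some m := by
  induction sd with
  | nil => cases hm
  | cons p rest ih =>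
    simp only [getName]
    by_cases he : p.1 = r
    · exact ⟨p.2, by simp [he]⟩
    · rcases List.mem_cons.mp hm with h1 | h1
      · exact absurd (congrArg Prod.fst h1.symm) he
      · obtain ⟨m, hm'⟩ := ih h1
        exact ⟨m, by simp [he, hm']⟩

theorem contains_of_get?_some {ν : Type} (d : PySem.Dict String ν) (k : String) (v : ν)
    (h : d.get? k = some v) : d.contains k = true := by
  cases hc : d.contains k with
  | false => rw [(PySem.Dict.get?_eq_none_iff_contains d k).mpr hc] at h; cases h
  | true => rfl

-- B's first-wins insertion loop computes the first match, like A's scans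
theorem firstwins_get? {ν : Type} (f : String × String → ν) (l : List (String × String))
    (d : PySem.Dict String ν) (k : String) :
    (l.foldl (fun d p => if d.contains p.1 then d else d.insert p.1 (f p)) d).get? k
      = (d.get? k).or ((l.find? (fun p => p.1 == k)).map f) := by
  induction l generalizing d with
  | nil => simp
  | cons p rest ih =>
    simp only [List.foldl_cons]
    by_cases hc : d.contains p.1 = true
    · rw [if_pos hc, ih]
      by_cases he : p.1 = k
      · subst he
        obtain ⟨v, hv⟩ : ∃ v, d.get? p.1 = some v := by
          rcases h : d.get? p.1 with _ | v
          · rw [PySem.Dict.get?_eq_none_iff_contains] at h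
            exact absurd hc (by simp [h])
          · exact ⟨v, rfl⟩
        simp [hv]
      · rw [List.find?_cons_of_neg (by simp [he])]
    · rw [if_neg hc, ih]
      have hd : d.get? p.1 = none := by
        rcases h : d.get? p.1 with _ | v
        · rfl
        · exact absurd (contains_of_get?_some d p.1 v h) hc
      by_cases he : p.1 = k
      · subst he
        rw [List.find?_cons_of_pos (by simp)]
        rw [PySem.Dict.get?_insert]
        simp [hd]
      · rw [List.find?_cons_of_neg (by simp [he])]
        rw [PySem.Dict.get?_insert]
        simp [Ne.symm he]

-- B's grouping loop: the bucket of a present key collects t's matching rows, in order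
theorem group_getD (g : String × String × String → String × String × String)
    (t : List (String × String × String))
    (d : PySem.Dict String (String × List (String × String × String))) (r : String)
    (hr : d.contains r = true) :
    ((t.foldl (fun d j => if d.contains j.1 then d.modify j.1 ("", []) (fun pr => (pr.1, pr.2 ++ [g j])) else d) d).getD r ("", []))
      = ((d.getD r ("", [])).1, (d.getD r ("", [])).2 ++ (t.filter (fun j => j.1 == r)).map g) := by
  induction t generalizing d with
  | nil => simp
  | cons j rest ih =>
    simp only [List.foldl_cons, List.filter_cons]
    by_cases hg : d.contains j.1 = true
    · rw [if_pos hg]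
      have hr' : (d.modify j.1 ("", []) (fun pr => (pr.1, pr.2 ++ [g j]))).contains r = true := by
        rw [PySem.Dict.contains_modify]; simp [hr]
      rw [ih _ hr', PySem.Dict.getD_modify]
      by_cases hjr : j.1 = r
      · subst hjr
        simp [List.append_assoc]
      · simp only [beq_iff_eq, hjr, if_false]
        have : ¬ (r = j.1) := fun he => hjr he.symm
        simp [this]
    · rw [if_neg hg]
      have hjr : ¬ (j.1 == r) = true := by
        intro he
        exact hg (by rwa [show j.1 = r from by simpa using he])
      rw [ih _ hr]
      simp [hjr]

-- a key-preserving map commutes with the stable insertion sort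
theorem insertBy_map {α β κ : Type} [LT κ] [DecidableLT κ] (f : α → β) (keya : α → κ) (keyb : β → κ)
    (hk : ∀ a, keyb (f a) = keya a) (x : α) (acc : List α) :
    PySem.List.insertBy (fun a b => decide (keyb a < keyb b)) (f x) (acc.map f)
      = (PySem.List.insertBy (fun a b => decide (keya a < keya b)) x acc).map f := by
  induction acc with
  | nil => rfl
  | cons y ys ih =>
    simp only [List.map_cons, PySem.List.insertBy, hk]
    split <;> simp only [List.map_cons, ih]

theorem foldl_insertBy_map {α β κ : Type} [LT κ] [DecidableLT κ] (f : α → β) (keya : α → κ) (keyb : β → κ)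
    (hk : ∀ a, keyb (f a) = keya a) (l : List α) (acc : List α) :
    l.foldl (fun acc x => PySem.List.insertBy (fun a b => decide (keyb a < keyb b)) (f x) acc) (acc.map f)
      = (l.foldl (fun acc x => PySem.List.insertBy (fun a b => decide (keya a < keya b)) x acc) acc).map f := by
  induction l generalizing acc with
  | nil => rfl
  | cons x xs ih =>
    simp only [List.foldl_cons]
    rw [insertBy_map f keya keyb hk x acc, ih]

theorem sorted_map_comm {α β κ : Type} [LT κ] [DecidableLT κ] (f : α → β) (keya : α → κ) (keyb : β → κ)
    (hk : ∀ a, keyb (f a) = keya a) (l : List α) :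
    PySem.List.sorted (l.map f) keyb false = (PySem.List.sorted l keya false).map f := by
  rw [PySem.List.sorted_eq_foldl_insertBy, PySem.List.sorted_eq_foldl_insertBy, List.foldl_map]
  exact foldl_insertBy_map f keya keyb hk l []

theorem transcript_spec : Claim_equal_transcript := by
  intro cd sd t _hdom _hpre
  unfold Spec_transcript
  set gA : String × String × String → String × String × String :=
    fun j => (j.2.1, (subjName j.2.1 cd).getD "", j.2.2) with hgA
  set fA : String × String → String × String × List (String × String × String) :=
    fun p => (p.1, (getName p.1 sd).getD "",
      PySem.List.sorted ((t.filter (fun j => j.1 == p.1)).map gA) (fun x => x.1) false) with hfA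
  -- A's result is the sorted map of fA over sd
  have hA : transcript cd sd t = PySem.List.sorted (sd.map fA) (fun x => x.1) false := by
    simp only [transcript, PySem.List.foldl_append_if, PySem.List.foldl_append_singleton_eq_map,
      List.nil_append, hfA, hgA]
  rw [hA, sorted_map_comm fA (fun p => p.1) (fun x => x.1) (fun p => rfl) sd]
  -- B's result is the same map over the sorted sd
  simp only [transcript_alt]
  apply (List.map_congr_left ?_).symm
  intro p hp
  have hpsd : p ∈ sd := (PySem.List.mem_sorted sd (fun x => x.1) false p).mp hp
  -- B's lookups agree with A's scans
  have hcode : ∀ c, (cd.foldl (fun d p => if d.contains p.1 then d else d.insert p.1 p.2) PySem.Dict.empty).get? c = subjName c cd := by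
    intro c
    rw [firstwins_get? Prod.snd cd PySem.Dict.empty c, subjName_eq_find?]
    rfl
  obtain ⟨m, hm⟩ := getName_isSome_of_mem sd p.1 p.2 hpsd
  have hs0 : (sd.foldl (fun d p => if d.contains p.1 then d else d.insert p.1 (p.2, ([] : List (String × String × String)))) PySem.Dict.empty).get? p.1 = some (m, []) := by
    rw [firstwins_get? (fun q => (q.2, [])) sd PySem.Dict.empty p.1]
    have : ((sd.find? (fun q => q.1 == p.1)).map Prod.snd) = some m := by
      rw [← getName_eq_find?, hm]
    rcases hfind : sd.find? (fun q => q.1 == p.1) with _ | q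
    · rw [hfind] at this; cases this
    · rw [hfind] at this
      simp only [Option.map_some, Option.some.injEq] at this
      simp [hfind, this]
  have hs0c : (sd.foldl (fun d p => if d.contains p.1 then d else d.insert p.1 (p.2, ([] : List (String × String × String)))) PySem.Dict.empty).contains p.1 = true :=
    contains_of_get?_some _ p.1 (m, []) hs0
  have hs0d : (sd.foldl (fun d p => if d.contains p.1 then d else d.insert p.1 (p.2, ([] : List (String × String × String)))) PySem.Dict.empty).getD p.1 ("", []) = (m, []) := by
    rw [PySem.Dict.getD_eq_get?_getD, hs0]
    rfl
  simp only [hcode]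
  rw [group_getD (fun j => (j.2.1, (subjName j.2.1 cd).getD "", j.2.2)) t _ p.1 hs0c, hs0d]
  simp [hfA, hgA, hm]
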